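-- pv_equiv track=rewrite | github.com/AmberLee2427/sphinx | sphinx/ext/agentskills.py | _group_objects_by_module
-- ===== SOURCE A (Python) =====
-- from typing import Any
--
-- def _group_objects_by_module(
--     objects: list[dict[str, Any]]
-- ) -> dict[str, list[dict[str, Any]]]:
--     """Group objects by their top-level package prefix."""
--     groups: dict[str, list[dict[str, Any]]] = {}
--     for obj in objects:
--         prefix = obj['name'].split('.')[0]
--         groups.setdefault(prefix, []).append(obj)
--     return dict(sorted(groups.items()))
-- ===== SOURCE B (Python) =====
-- from typing import Any
--
--
-- def _group_objects_by_module(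
--     objects: list[dict[str, Any]]
-- ) -> dict[str, list[dict[str, Any]]]:
--     """Group objects by their top-level package prefix (sorted-keys, filter per key)."""
--     prefixes = sorted({obj['name'].split('.')[0] for obj in objects})
--     return {
--         p: [obj for obj in objects if obj['name'].split('.')[0] == p]
--         for p in prefixes
--     }
-- ===== Notes on version B (the rewrite author's own statement) =====
-- stated objective: alternative
-- what changed: Replaces incremental hash-grouping (setdefault/append into a dict, then sorting its items) by computing the sorted set of distinct top-level prefixes once and building each group with a filter pass over the input.
import Mathlib
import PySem

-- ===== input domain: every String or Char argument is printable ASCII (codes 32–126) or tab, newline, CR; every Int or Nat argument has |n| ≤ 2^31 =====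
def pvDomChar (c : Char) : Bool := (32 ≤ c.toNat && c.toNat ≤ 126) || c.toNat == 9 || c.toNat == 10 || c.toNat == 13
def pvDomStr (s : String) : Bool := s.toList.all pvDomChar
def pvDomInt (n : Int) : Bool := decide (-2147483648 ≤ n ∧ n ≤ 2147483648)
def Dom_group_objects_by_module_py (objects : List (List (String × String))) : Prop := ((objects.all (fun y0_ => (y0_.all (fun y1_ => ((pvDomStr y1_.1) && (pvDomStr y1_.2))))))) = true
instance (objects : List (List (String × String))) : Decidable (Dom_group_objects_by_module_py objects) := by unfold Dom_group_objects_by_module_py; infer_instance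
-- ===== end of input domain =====

-- B groups by computing the sorted set of distinct prefixes once and filtering the input per prefix,
-- instead of A's setdefault/append dict grouping followed by a key-sort of the items (objective: alternative).

-- obj['name'].split('.')[0]: first-match assoc lookup (the Python dict), split on '.', first piece.
-- split('.') always returns a non-empty list, so headD "" is exact; the "" default of the lookup is
-- only reached outside Pre_ (missing 'name' key), where the Python raises KeyError.
def pvPrefix (o : List (String × String)) : String :=
  (((PySem.Str.split? (((o.find? (fun p => p.1 == "name")).map (·.2)).getD "") ".").getD []).headD "")

-- ===== PORT A =====
-- groups.setdefault(prefix, []).append(obj)  ≡  groups[prefix] = groups.get(prefix, []) + [obj]  = Dict.modify.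
-- sorted(groups.items()): dict keys are distinct, so Python's tuple comparison never reaches the
-- values — sorting by the key component is exact.
def group_objects_by_module_py (objects : List (List (String × String))) : List (String × List (List (String × String))) :=
  let groups := objects.foldl (fun d o => d.modify (pvPrefix o) [] (fun l => l ++ [o])) PySem.Dict.empty
  PySem.List.sorted groups.items (fun p => p.1) false

-- ===== PORT B =====
def group_objects_by_module_py_alt (objects : List (List (String × String))) : List (String × List (List (String × String))) :=
  let prefixes := PySem.List.sorted (PySem.Set.ofList (objects.map pvPrefix)) (fun p => p) false
  prefixes.map (fun p => (p, objects.filter (fun o => pvPrefix o == p)))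

-- ===== PRECONDITION & SPEC =====
-- Pre_ excludes objects lacking a 'name' key, on which the Python A raises KeyError (B raises there too).
def Pre_group_objects_by_module_py (objects : List (List (String × String))) : Prop :=
  ∀ o ∈ objects, "name" ∈ o.map (·.1)
instance (objects : List (List (String × String))) : Decidable (Pre_group_objects_by_module_py objects) := by unfold Pre_group_objects_by_module_py; infer_instance
def pvWitness_group_objects_by_module_py : (List (List (String × String))) :=
  [[("name", "pkg.mod"), ("kind", "class")], [("name", "alpha")], [("name", "pkg.other")]]

def Spec_group_objects_by_module_py (objects : List (List (String × String))) (out : List (String × List (List (String × String)))) : Prop := out = group_objects_by_module_py_alt objects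
instance (objects : List (List (String × String))) (out : List (String × List (List (String × String)))) : Decidable (Spec_group_objects_by_module_py objects out) := by unfold Spec_group_objects_by_module_py; infer_instance

-- ===== CLAIM (what is proved, stated in full; the proofs are below) =====
def Claim_equal_group_objects_by_module_py : Prop := ∀ (objects : List (List (String × String))), Dom_group_objects_by_module_py objects → Pre_group_objects_by_module_py objects → Spec_group_objects_by_module_py objects (group_objects_by_module_py objects)

-- ===== LEMMAS AND PROOFS =====

theorem grouped_items (objects : List (List (String × String))) :
    (objects.foldl (fun d o => d.modify (pvPrefix o) [] (fun l => l ++ [o])) PySem.Dict.empty).items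
      = (PySem.Set.ofList (objects.map pvPrefix)).map
          (fun k => (k, objects.filter (fun o => pvPrefix o == k))) := by
  have hnd : (objects.foldl (fun d o => d.modify (pvPrefix o) [] (fun l => l ++ [o])) PySem.Dict.empty).keys.Nodup :=
    PySem.Dict.nodup_keys_foldl_modify_key objects pvPrefix [] _ PySem.Dict.empty (by simp)
  rw [PySem.Dict.items_eq_map_keys _ hnd []]
  have hkeys : (objects.foldl (fun d o => d.modify (pvPrefix o) [] (fun l => l ++ [o])) PySem.Dict.empty).keys
      = PySem.Set.ofList (objects.map pvPrefix) := by
    rw [PySem.Dict.keys_foldl_modify_key]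
    simp [PySem.Set.update_nil_left]
  rw [hkeys]
  refine List.map_congr_left (fun k _ => ?_)
  have hfold : objects.foldl (fun d o => d.modify (pvPrefix o) [] (fun l => l ++ [o])) PySem.Dict.empty
      = (objects.map (fun o => (pvPrefix o, o))).foldl (fun d p => d.modify p.1 [] (fun l => l ++ [p.2])) PySem.Dict.empty := by
    rw [List.foldl_map]
  rw [hfold, PySem.Dict.getD_foldl_modify_append]
  simp [List.filter_map, Function.comp_def]

-- ===== VERDICT (by name: the statement is the Claim_ definition above) =====
theorem group_objects_by_module_py_spec : Claim_equal_group_objects_by_module_py := by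
  intro objects _ _
  unfold Spec_group_objects_by_module_py group_objects_by_module_py group_objects_by_module_py_alt
  dsimp only
  rw [grouped_items]
  apply PySem.List.sorted_eq_of_perm_of_pairwise_lt
  · exact List.Perm.map _ (PySem.List.sorted_perm _ _ _)
  · rw [List.pairwise_map]
    exact PySem.List.sorted_ofList_pairwise_lt _
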